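-- pv_equiv track=rewrite | github.com/Free-Rat/Optymalizacja-kompozycji-TFT | program/AI/at4.py | generate_team_combs
-- ===== SOURCE A (Python) =====
-- from collections import Counter
--
-- def generate_team_combs(traits, units, team_capacity):
--     team_combs = []
--
--     while len(team_combs) < team_capacity:
--         team = []
--         trait_counts = Counter()
--
--         for unit in units:
--             if trait_counts[unit['trait']] < 6:
--                 team.append(unit)
--                 trait_counts[unit['trait']] += 1
--
--         team_combs.append(team)
--
--     return team_combs
-- ===== SOURCE B (Python) =====
-- def generate_team_combs(traits, units, team_capacity):
--     if team_capacity <= 0: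
--         return []
--     unit_traits = [u['trait'] for u in units]
--     keep = []
--     for t in dict.fromkeys(unit_traits):
--         group = [i for i, tt in enumerate(unit_traits) if tt == t]
--         keep.extend(group[:6])
--     keep.sort()
--     team = [units[i] for i in keep]
--     return [team.copy() for _ in range(team_capacity)]
-- ===== Notes on version B (the rewrite author's own statement) =====
-- stated objective: alternative
-- what changed: B builds the team by grouping unit indices per trait (dict.fromkeys order), truncating each trait group to its first 6 indices, sort-merging the kept indices and gathering units by index, then replicates that team; A rebuilds the identical team team_capacity times with a per-iteration running Counter filter pass.
import Mathlib
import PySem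

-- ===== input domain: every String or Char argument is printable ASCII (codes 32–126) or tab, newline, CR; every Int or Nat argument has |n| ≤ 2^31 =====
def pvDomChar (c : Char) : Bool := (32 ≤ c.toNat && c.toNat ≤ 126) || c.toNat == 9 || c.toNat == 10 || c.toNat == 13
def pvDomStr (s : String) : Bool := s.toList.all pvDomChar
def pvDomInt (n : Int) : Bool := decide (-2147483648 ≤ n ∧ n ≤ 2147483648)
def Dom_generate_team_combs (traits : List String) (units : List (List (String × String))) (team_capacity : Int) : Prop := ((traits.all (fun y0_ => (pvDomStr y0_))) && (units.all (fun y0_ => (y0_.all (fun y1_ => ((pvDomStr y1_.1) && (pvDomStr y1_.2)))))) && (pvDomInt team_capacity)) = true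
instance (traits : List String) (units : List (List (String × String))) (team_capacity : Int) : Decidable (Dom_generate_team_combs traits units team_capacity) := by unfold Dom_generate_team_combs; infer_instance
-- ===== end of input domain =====

-- B builds the team once by grouping unit indices per trait, truncating each group to its
-- first 6 indices, sort-merging the kept indices and gathering by index, then replicates it;
-- A rebuilds the team with a running Counter once per capacity slot.

-- ===== PORT A =====
-- inner 'for unit in units' body; unit['trait'] is a dict lookup = first match in the
-- association list (a missing key is a KeyError, excluded by Pre_; the 'none' branch
-- leaves the state unchanged and is never reached inside Pre_)
def pvStepA (st : List (List (String × String)) × PySem.Dict String Int)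
    (unit : List (String × String)) :
    List (List (String × String)) × PySem.Dict String Int :=
  match List.lookup "trait" unit with
  | none => st
  | some t =>
      if PySem.Dict.getD st.2 t 0 < 6 then
        (st.1 ++ [unit], st.2.insert t (PySem.Dict.getD st.2 t 0 + 1))
      else st

-- one iteration of the while body: team = [], trait_counts = Counter(), then the for loop
def pvBuildTeamA (units : List (List (String × String))) : List (List (String × String)) :=
  (units.foldl pvStepA ([], PySem.Dict.empty)).1

-- 'while len(team_combs) < team_capacity': appends one freshly built team per iteration,
-- so it runs exactly team_capacity.toNat times (each iteration re-runs the for loop)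
def pvWhileA (units : List (List (String × String))) :
    Nat → List (List (List (String × String)))
  | 0 => []
  | n + 1 => pvBuildTeamA units :: pvWhileA units n

def generate_team_combs (traits : List String) (units : List (List (String × String))) (team_capacity : Int) : List (List (List (String × String))) :=
  pvWhileA units team_capacity.toNat

-- ===== PORT B =====
-- unit_traits = [u['trait'] for u in units]  (the lookup, kept as Option: none = KeyError,
-- outside Pre_); dict.fromkeys = PySem.List.dedup; the per-trait group is the enumerate
-- comprehension; keep.extend(group[:6]) is the foldl append; keep.sort() = PySem sorted;
-- team copies are gathered by integer indexing units[i].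
def generate_team_combs_alt (traits : List String) (units : List (List (String × String))) (team_capacity : Int) : List (List (List (String × String))) :=
  if team_capacity ≤ 0 then []
  else
    (PySem.List.pyRange 0 team_capacity 1).map (fun _ =>
      (PySem.List.sorted ((PySem.List.dedup (units.map (fun u => List.lookup "trait" u))).foldl
        (fun acc t => acc ++ ((((PySem.List.enumerate (units.map (fun u => List.lookup "trait" u)) 0).filter
            (fun q => q.2 == t)).map (fun q => q.1)).take 6)) []) (fun x => x) false).map
        (fun i => (PySem.List.pyGet? units i).getD []))

-- ===== PRECONDITION & SPEC =====
-- Pre_ excludes exactly the inputs where A raises KeyError: team_capacity > 0 while some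
-- unit has no "trait" key (first-match lookup).
def Pre_generate_team_combs (traits : List String) (units : List (List (String × String))) (team_capacity : Int) : Prop :=
  team_capacity ≤ 0 ∨ ∀ u ∈ units, (List.lookup "trait" u).isSome
instance (traits : List String) (units : List (List (String × String))) (team_capacity : Int) : Decidable (Pre_generate_team_combs traits units team_capacity) := by unfold Pre_generate_team_combs; infer_instance

def pvWitness_generate_team_combs : List String × (List (List (String × String))) × Int :=
  (["a"], [[("trait", "a")], [("trait", "b"), ("x", "y")]], 2)

def Spec_generate_team_combs (traits : List String) (units : List (List (String × String))) (team_capacity : Int) (out : List (List (List (String × String)))) : Prop := out = generate_team_combs_alt traits units team_capacity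
instance (traits : List String) (units : List (List (String × String))) (team_capacity : Int) (out : List (List (List (String × String)))) : Decidable (Spec_generate_team_combs traits units team_capacity out) := by unfold Spec_generate_team_combs; infer_instance

-- ===== CLAIM (what is proved, stated in full; the proofs are below) =====
def Claim_equal_generate_team_combs : Prop := ∀ (traits : List String) (units : List (List (String × String))) (team_capacity : Int), Dom_generate_team_combs traits units team_capacity → Pre_generate_team_combs traits units team_capacity → Spec_generate_team_combs traits units team_capacity (generate_team_combs traits units team_capacity)

-- ===== LEMMAS AND PROOFS =====

-- the trait of the unit at index j (none past the end / missing key)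
def pvTr (units : List (List (String × String))) (j : Nat) : Option String :=
  List.lookup "trait" (units.getD j [])

-- how many earlier units share index i's trait
def pvPc (units : List (List (String × String))) (i : Nat) : Nat :=
  (List.range i).countP (fun j => pvTr units j == pvTr units i)

-- the canonical kept index set: indices whose trait has appeared < 6 times before
def pvK (units : List (List (String × String))) : List Nat :=
  (List.range units.length).filter (fun i => pvPc units i < 6)

theorem pvWhileA_eq_replicate (units : List (List (String × String))) (n : Nat) :
    pvWhileA units n = List.replicate n (pvBuildTeamA units) := by
  induction n with
  | zero => rfl
  | succ n ih => rw [pvWhileA, ih, List.replicate_succ]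

-- recursive description of the capped team: process units left to right, carrying prefix p
def pvBRec (p : List (List (String × String))) :
    List (List (String × String)) → List (List (String × String))
  | [] => []
  | u :: rest =>
      if p.countP (fun v => List.lookup "trait" v == List.lookup "trait" u) < 6 then
        u :: pvBRec (p ++ [u]) rest
      else pvBRec (p ++ [u]) rest

theorem pvFoldA_eq_bRec (rest : List (List (String × String))) :
    ∀ (p : List (List (String × String))) (acc : List (List (String × String)))
      (d : PySem.Dict String Int),
      (∀ u ∈ rest, (List.lookup "trait" u).isSome) →
      (∀ t : String, PySem.Dict.getD d t 0 =
        min ((p.countP (fun v => List.lookup "trait" v == some t) : Int)) 6) →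
      (rest.foldl pvStepA (acc, d)).1 = acc ++ pvBRec p rest := by
  induction rest with
  | nil => intro p acc d _ _; simp [pvBRec]
  | cons u rest ih =>
      intro p acc d hall hd
      obtain ⟨t, ht⟩ := Option.isSome_iff_exists.mp (hall u (List.mem_cons_self ..))
      have hcnt := hd t
      have h1 : ∀ t' : String, List.countP
          (fun v => List.lookup "trait" v == some t') [u] = if t' = t then 1 else 0 := by
        intro t'
        by_cases he : t' = t
        · simp [ht, he]
        · have : (some t == some t') = false := by
            simp
            exact fun h => he h.symm
          simp [ht, this]
          exact he
      simp only [List.foldl_cons, pvStepA, ht, pvBRec]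
      by_cases hlt : p.countP (fun v => List.lookup "trait" v == some t) < 6
      · have hclt : PySem.Dict.getD d t 0 < 6 := by rw [hcnt]; omega
        simp only [hclt, if_pos, if_pos hlt]
        rw [ih (p ++ [u]) (acc ++ [u]) _ (fun v hv => hall v (List.mem_cons_of_mem _ hv))]
        · simp
        · intro t'
          rw [PySem.Dict.getD_insert, List.countP_append, h1 t']
          by_cases he : t' = t
          · rw [if_pos he, if_pos he, he, hcnt]; push_cast; omega
          · rw [if_neg he, if_neg he, hd t']; push_cast; omega
      · have hclt : ¬ PySem.Dict.getD d t 0 < 6 := by rw [hcnt]; omega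
        simp only [hclt, if_neg hlt, ite_false]
        rw [ih (p ++ [u]) acc d (fun v hv => hall v (List.mem_cons_of_mem _ hv))]
        intro t'
        rw [hd t', List.countP_append, h1 t']
        by_cases he : t' = t
        · rw [if_pos he, he]; push_cast; omega
        · rw [if_neg he]; push_cast; omega

theorem pvMap_const_replicate {α β : Type} (l : List α) (b : β) :
    l.map (fun _ => b) = List.replicate l.length b := by
  induction l with
  | nil => rfl
  | cons x xs ih => simp [List.replicate_succ, ih]


-- indexing into the mapped trait list equals the trait at that index
theorem pvUtD_eq (units : List (List (String × String))) (j : Nat) :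
    (units.map (fun u => List.lookup "trait" u)).getD j none = pvTr units j := by
  rcases h : units[j]? with _ | u
  · have hj : units.length ≤ j := by simpa using List.getElem?_eq_none_iff.mp h
    simp [List.getD, List.getElem?_map, h, pvTr, List.getElem?_eq_none_iff.mpr hj]
  · simp [List.getD, List.getElem?_map, h, pvTr]

-- counting over the index range = counting over the list
theorem pvCountP_range {α : Type} (l : List α) (d : α) (q : α → Bool) :
    (List.range l.length).countP (fun j => q (l.getD j d)) = l.countP q := by
  induction l with
  | nil => simp
  | cons a l ih =>
      rw [List.length_cons, List.range_succ_eq_map, List.countP_cons, List.countP_map]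
      have h : ((fun j => q ((a :: l).getD j d)) ∘ Nat.succ) = fun j => q (l.getD j d) := by
        funext j; simp
      rw [h, ih, List.countP_cons]
      simp

-- A's capped-team recursion selects exactly the indices whose prefix trait count is < 6
theorem pvBRec_eq_range' (rest : List (List (String × String))) :
    ∀ (p full : List (List (String × String))), full = p ++ rest →
    pvBRec p rest = ((List.range' p.length rest.length).filter
        (fun i => pvPc full i < 6)).map (fun i => full.getD i []) := by
  induction rest with
  | nil => intro p full h; simp [pvBRec]
  | cons u rest ih =>
      intro p full h
      have hget : full.getD p.length [] = u := by
        subst h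
        simp [List.getD, List.getElem?_append_right (Nat.le_refl p.length)]
      have hpre : ∀ j, j < p.length → full.getD j [] = p.getD j [] := by
        intro j hj
        subst h
        simp [List.getD, List.getElem?_append_left hj]
      have hpc : pvPc full p.length
          = p.countP (fun v => List.lookup "trait" v == List.lookup "trait" u) := by
        unfold pvPc
        rw [← pvCountP_range p [] (fun v => List.lookup "trait" v == List.lookup "trait" u)]
        apply List.countP_congr
        intro j hj
        have hj' : j < p.length := List.mem_range.mp hj
        simp only [pvTr]
        rw [hpre j hj', hget]
      have hlen : (p ++ [u]).length = p.length + 1 := by simp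
      have hfull : full = (p ++ [u]) ++ rest := by simp [h]
      have hrange : List.range' p.length (u :: rest).length
          = p.length :: List.range' (p.length + 1) rest.length := by
        rw [List.length_cons, List.range'_succ]
      rw [hrange, List.filter_cons]
      by_cases hc : p.countP (fun v => List.lookup "trait" v == List.lookup "trait" u) < 6
      · have hd : decide (pvPc full p.length < 6) = true := by simp [hpc, hc]
        rw [pvBRec, if_pos hc, hd]
        simp only [if_pos]
        rw [List.map_cons, hget, ih (p ++ [u]) full hfull, hlen]
      · have hd : decide (pvPc full p.length < 6) = false := by simp [hpc]; omega
        rw [pvBRec, if_neg hc, hd]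
        simp only [Bool.false_eq_true, if_neg, not_false_iff]
        rw [ih (p ++ [u]) full hfull, hlen]

-- membership in take k of a strictly increasing list = member with < k smaller members
theorem pvMem_take_iff (m : List Nat) (hm : m.Pairwise (· < ·)) (k x : Nat) :
    x ∈ m.take k ↔ x ∈ m ∧ m.countP (fun y => decide (y < x)) < k := by
  induction m generalizing k with
  | nil => simp
  | cons a m ih =>
      have ha : ∀ y ∈ m, a < y := (List.pairwise_cons.mp hm).1
      have hm' := (List.pairwise_cons.mp hm).2
      rcases k with _ | k
      · simp
      · by_cases hx : x = a
        · subst hx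
          have h0 : (x :: m).countP (fun y => decide (y < x)) = 0 := by
            rw [List.countP_eq_zero]
            intro y hy
            rcases List.mem_cons.mp hy with rfl | hy'
            · simp
            · have := ha y hy'
              simp
              omega
          simp [List.take_succ_cons, h0]
        · rw [List.take_succ_cons]
          have hmem : (x ∈ a :: m.take k) ↔ x ∈ m.take k := by
            simp [List.mem_cons, hx]
          rw [hmem, ih hm' k]
          constructor
          · rintro ⟨hxm, hc⟩
            have hax : a < x := ha x hxm
            have hcc : (a :: m).countP (fun y => decide (y < x))
                = m.countP (fun y => decide (y < x)) + 1 := by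
              rw [List.countP_cons]
              simp [hax]
            exact ⟨List.mem_cons_of_mem _ hxm, by rw [hcc]; omega⟩
          · rintro ⟨hxm, hc⟩
            rcases List.mem_cons.mp hxm with rfl | hxm'
            · exact absurd rfl hx
            · have hax : a < x := ha x hxm'
              have hcc : (a :: m).countP (fun y => decide (y < x))
                  = m.countP (fun y => decide (y < x)) + 1 := by
                rw [List.countP_cons]
                simp [hax]
              rw [hcc] at hc
              exact ⟨hxm', by omega⟩

-- enumerate as a map over the index range
theorem pvEnum_eq (l : List (Option String)) :
    ∀ (s : Nat), PySem.List.enumerate l ((s : Nat) : Int)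
      = (List.range l.length).map (fun k => (((s + k : Nat) : Int), l.getD k none)) := by
  induction l with
  | nil => intro s; simp [PySem.List.enumerate_nil]
  | cons a l ih =>
      intro s
      rw [PySem.List.enumerate_cons]
      have h1 : ((s : Nat) : Int) + 1 = (((s + 1 : Nat)) : Int) := by push_cast; ring
      rw [h1, ih (s + 1), List.length_cons, List.range_succ_eq_map, List.map_cons,
        List.map_map]
      congr 1
      apply List.map_congr_left
      intro k hk
      simp only [Function.comp_apply]
      exact Prod.ext (congrArg Nat.cast (by omega)) rfl

-- the per-trait index group: positions in increasing order whose unit has trait t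
def pvGN (units : List (List (String × String))) (t : Option String) : List Nat :=
  (List.range units.length).filter (fun j => pvTr units j == t)

-- the group-by-trait comprehension = the index-range filter for that trait, cast to Int
theorem pvGroup_eq (units : List (List (String × String))) (t : Option String) :
    (((PySem.List.enumerate (units.map (fun u => List.lookup "trait" u)) 0).filter
        (fun q => q.2 == t)).map (fun q => q.1))
      = (pvGN units t).map (fun i => ((i : Nat) : Int)) := by
  have h0 : (0 : Int) = ((0 : Nat) : Int) := rfl
  rw [h0, pvEnum_eq, List.filter_map, List.map_map, List.length_map]
  have hf : ∀ k ∈ List.range units.length,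
      ((fun q : Int × Option String => q.2 == t) ∘
        (fun k => (((0 + k : Nat) : Int), (units.map (fun u => List.lookup "trait" u)).getD k none))) k
      = (pvTr units k == t) := by
    intro k hk
    show (((units.map (fun u => List.lookup "trait" u)).getD k none) == t)
        = (pvTr units k == t)
    rw [pvUtD_eq]
  rw [List.filter_congr hf]
  apply List.map_congr_left
  intro k hk
  simp [Function.comp_def]

theorem pvGN_pairwise (units : List (List (String × String))) (t : Option String) :
    (pvGN units t).Pairwise (· < ·) :=
  List.Pairwise.filter _ List.pairwise_lt_range

theorem pvMem_gN (units : List (List (String × String))) (t : Option String) (i : Nat) :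
    i ∈ pvGN units t ↔ i < units.length ∧ pvTr units i = t := by
  simp [pvGN, List.mem_filter, List.mem_range]

theorem pvGN_count (units : List (List (String × String))) (i : Nat)
    (hi : i < units.length) :
    (pvGN units (pvTr units i)).countP (fun y => decide (y < i)) = pvPc units i := by
  unfold pvGN
  rw [List.countP_filter]
  have hsplit : List.range units.length
      = List.range i ++ (List.range (units.length - i)).map (fun x => i + x) := by
    rw [← List.range_add]
    congr 1
    omega
  rw [hsplit, List.countP_append]
  have h2 : List.countP (fun a => decide (a < i) && (pvTr units a == pvTr units i))
      ((List.range (units.length - i)).map (fun x => i + x)) = 0 := by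
    rw [List.countP_eq_zero]
    intro a ha
    rcases List.mem_map.mp ha with ⟨x, _, rfl⟩
    simp
  rw [h2, Nat.add_zero]
  unfold pvPc
  apply List.countP_congr
  intro j hj
  have hj' : j < i := List.mem_range.mp hj
  simp [hj', Bool.and_comm]

theorem pvMem_take6 (units : List (List (String × String))) (t : Option String) (i : Nat) :
    i ∈ (pvGN units t).take 6 ↔ i < units.length ∧ pvTr units i = t ∧ pvPc units i < 6 := by
  rw [pvMem_take_iff _ (pvGN_pairwise units t) 6 i, pvMem_gN]
  constructor
  · rintro ⟨⟨hi, ht⟩, hc⟩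
    subst ht
    rw [pvGN_count units i hi] at hc
    exact ⟨hi, rfl, hc⟩
  · rintro ⟨hi, ht, hc⟩
    subst ht
    exact ⟨⟨hi, rfl⟩, by rw [pvGN_count units i hi]; exact hc⟩

theorem pvMem_K (units : List (List (String × String))) (i : Nat) :
    i ∈ pvK units ↔ i < units.length ∧ pvPc units i < 6 := by
  simp [pvK, List.mem_filter, List.mem_range]

-- distinct traits keep disjoint index groups
theorem pvDisj (units : List (List (String × String))) {t t' : Option String}
    (hne : t ≠ t') :
    List.Disjoint (((pvGN units t).take 6).map (fun i => ((i : Nat) : Int)))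
      (((pvGN units t').take 6).map (fun i => ((i : Nat) : Int))) := by
  intro x hx hx'
  rcases List.mem_map.mp hx with ⟨j, hj6, hjx⟩
  rcases List.mem_map.mp hx' with ⟨j', hj6', hjx'⟩
  have hjj : ((j' : Nat) : Int) = ((j : Nat) : Int) := hjx'.trans hjx.symm
  have hje : j' = j := by exact_mod_cast hjj
  rw [hje] at hj6'
  rcases (pvMem_take6 units t j).mp hj6 with ⟨_, ht, _⟩
  rcases (pvMem_take6 units t' j).mp hj6' with ⟨_, ht', _⟩
  exact hne (ht.symm.trans ht')

-- B's merged kept-index list, sorted, is exactly the canonical kept index set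
theorem pvKeep_sorted (units : List (List (String × String))) :
    PySem.List.sorted ((PySem.List.dedup (units.map (fun u => List.lookup "trait" u))).foldl
      (fun acc t => acc ++ ((((PySem.List.enumerate (units.map (fun u => List.lookup "trait" u)) 0).filter
          (fun q => q.2 == t)).map (fun q => q.1)).take 6)) []) (fun x => x) false
      = (pvK units).map (fun i => ((i : Nat) : Int)) := by
  rw [PySem.List.foldl_append_eq_flatMap, List.nil_append]
  have hgrp : (fun t => ((((PySem.List.enumerate (units.map (fun u => List.lookup "trait" u)) 0).filter
          (fun q => q.2 == t)).map (fun q => q.1)).take 6))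
      = fun t => ((pvGN units t).take 6).map (fun i => ((i : Nat) : Int)) := by
    funext t
    rw [pvGroup_eq, ← List.map_take]
  rw [hgrp]
  -- facts about the groups
  have hnodup6 : ∀ t : Option String, (((pvGN units t).take 6).map
      (fun i => ((i : Nat) : Int))).Nodup := by
    intro t
    apply List.Nodup.map
    · intro a b hab
      have hab' : ((a : Nat) : Int) = ((b : Nat) : Int) := hab
      exact_mod_cast hab'
    · exact ((pvGN_pairwise units t).imp Nat.ne_of_lt).sublist (List.take_sublist 6 _)
  have hmemflat : ∀ x : Int,
      x ∈ (PySem.List.dedup (units.map (fun u => List.lookup "trait" u))).flatMap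
        (fun t => ((pvGN units t).take 6).map (fun i => ((i : Nat) : Int)))
      ↔ ∃ i ∈ pvK units, ((i : Nat) : Int) = x := by
    intro x
    rw [List.mem_flatMap]
    constructor
    · rintro ⟨t, _, hx⟩
      rcases List.mem_map.mp hx with ⟨i, hi, rfl⟩
      rcases (pvMem_take6 units t i).mp hi with ⟨hin, _, hc⟩
      exact ⟨i, (pvMem_K units i).mpr ⟨hin, hc⟩, rfl⟩
    · rintro ⟨i, hiK, rfl⟩
      rcases (pvMem_K units i).mp hiK with ⟨hin, hc⟩
      refine ⟨pvTr units i, ?_, List.mem_map.mpr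
        ⟨i, (pvMem_take6 units (pvTr units i) i).mpr ⟨hin, rfl, hc⟩, rfl⟩⟩
      rw [PySem.List.mem_dedup]
      refine List.mem_map.mpr ⟨units[i]'hin, List.getElem_mem hin, ?_⟩
      rw [pvTr, List.getD_eq_getElem _ _ hin]
  have hnodupflat : ((PySem.List.dedup (units.map (fun u => List.lookup "trait" u))).flatMap
      (fun t => ((pvGN units t).take 6).map (fun i => ((i : Nat) : Int)))).Nodup := by
    rw [List.flatMap_def, List.nodup_flatten]
    constructor
    · intro l' hl'
      rcases List.mem_map.mp hl' with ⟨t, _, rfl⟩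
      exact hnodup6 t
    · rw [List.pairwise_map]
      exact List.Pairwise.imp (fun {t t'} h => pvDisj units h)
        (PySem.List.nodup_dedup _)
  have hKnodup : ((pvK units).map (fun i => ((i : Nat) : Int))).Nodup := by
    apply List.Nodup.map
    · intro a b hab
      have hab' : ((a : Nat) : Int) = ((b : Nat) : Int) := hab
      exact_mod_cast hab'
    · exact (List.Pairwise.filter _ List.pairwise_lt_range).imp Nat.ne_of_lt
  apply PySem.List.sorted_eq_of_perm_of_pairwise_lt
  · rw [List.perm_ext_iff_of_nodup hKnodup hnodupflat]
    intro x
    rw [hmemflat x, List.mem_map]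
  · rw [List.pairwise_map]
    apply (List.Pairwise.filter _ List.pairwise_lt_range).imp
    intro a b hab
    exact_mod_cast hab

-- ===== VERDICT (by name: the statement is the Claim_ definition above) =====
theorem generate_team_combs_spec : Claim_equal_generate_team_combs := by
  intro traits units tc _ hpre
  unfold Spec_generate_team_combs generate_team_combs generate_team_combs_alt
  by_cases htc : tc ≤ 0
  · have h0 : tc.toNat = 0 := Int.toNat_of_nonpos htc
    simp [htc, h0, pvWhileA]
  · rcases hpre with h | hall
    · exact absurd h htc
    rw [if_neg htc, pvWhileA_eq_replicate]
    have hteamA : pvBuildTeamA units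
        = (pvK units).map (fun i => units.getD i []) := by
      rw [pvBuildTeamA,
        pvFoldA_eq_bRec units [] [] PySem.Dict.empty hall (by intro t; simp),
        List.nil_append, pvBRec_eq_range' units [] units rfl]
      rw [pvK, List.length_nil, ← List.range_eq_range']
    have hteamB :
        ((pvK units).map (fun i => ((i : Nat) : Int))).map
          (fun i => (PySem.List.pyGet? units i).getD [])
        = (pvK units).map (fun i => units.getD i []) := by
      rw [List.map_map]
      apply List.map_congr_left
      intro i hi
      have hin : i < units.length := ((pvMem_K units i).mp hi).1
      simp [Function.comp_def, PySem.List.pyGet?_natCast, List.getD,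
        List.getElem?_eq_getElem hin]
    rw [pvKeep_sorted units, hteamB, ← hteamA]
    rw [pvMap_const_replicate, PySem.List.length_pyRange_one]
    simp
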